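-- pv_equiv track=rewrite | github.com/antithesishq/ethereum-testnet-bootstrapper | src/fork_detector.py | rehash_parent_hash
-- ===== SOURCE A (Python) =====
-- def rehash_parent_hash(clients_and_data): # returns the clients_and_data with rehashed parents and the hash map for rehashing
--     count = 1
--     new_hash = {}
--     clients_and_data_rehashed = []
--     for [client, data] in clients_and_data:
--         data_rehashed = []
--         for [parent, slot] in data:
--             parents_rehashed = []
--             if parent not in new_hash:
--                 new_hash[parent] = count
--                 count += 1
--             data_rehashed.append([new_hash[parent], slot])
--         clients_and_data_rehashed.append([client, data_rehashed])
--     return [clients_and_data_rehashed, new_hash]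
-- ===== SOURCE B (Python) =====
-- def rehash_parent_hash(clients_and_data):
--     # Pass 1: build the id map (first occurrence order, ids from 1).
--     new_hash = {}
--     for client, data in clients_and_data:
--         for parent, slot in data:
--             if parent not in new_hash:
--                 new_hash[parent] = len(new_hash) + 1
--     # Pass 2: remap everything with pure lookups.
--     clients_and_data_rehashed = [
--         [client, [[new_hash[parent], slot] for parent, slot in data]]
--         for client, data in clients_and_data
--     ]
--     return [clients_and_data_rehashed, new_hash]
-- ===== Notes on version B (the rewrite author's own statement) =====
-- stated objective: alternative
-- what changed: Splits A's single interleaved pass (which threads a counter and builds the result while assigning ids) into two separate passes: a first pass that only builds the id map, with the counter replaced by len(new_hash)+1, and a second pure-lookup nested comprehension that rebuilds the remapped structure.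
import Mathlib
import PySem

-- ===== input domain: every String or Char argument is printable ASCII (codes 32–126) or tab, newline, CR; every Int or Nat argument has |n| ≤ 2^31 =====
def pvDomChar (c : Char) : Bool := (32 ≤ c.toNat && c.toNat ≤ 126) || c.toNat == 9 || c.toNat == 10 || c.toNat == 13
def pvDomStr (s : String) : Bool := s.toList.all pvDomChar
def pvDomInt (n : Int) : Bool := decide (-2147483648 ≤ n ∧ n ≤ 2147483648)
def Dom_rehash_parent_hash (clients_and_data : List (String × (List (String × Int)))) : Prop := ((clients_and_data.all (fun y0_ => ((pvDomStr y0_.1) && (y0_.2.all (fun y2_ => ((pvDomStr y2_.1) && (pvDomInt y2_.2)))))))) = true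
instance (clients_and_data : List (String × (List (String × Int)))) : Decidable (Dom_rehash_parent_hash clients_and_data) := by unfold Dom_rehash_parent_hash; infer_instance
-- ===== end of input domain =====

-- B replaces A's single interleaved pass (counter + remap while assigning ids) with an
-- id-map-building pass followed by a pure-lookup remapping pass (objective: alternative).

-- ===== PORT A =====
def rehash_parent_hash (clients_and_data : List (String × (List (String × Int)))) : (List (String × (List (Int × Int)))) × (List (String × Int)) :=
  let r := clients_and_data.foldl
    (fun (st : Int × PySem.Dict String Int × List (String × List (Int × Int))) cd =>
      let r2 := cd.2.foldl
        (fun (st2 : Int × PySem.Dict String Int × List (Int × Int)) ps =>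
          let st3 := if st2.2.1.contains ps.1 then (st2.1, st2.2.1)
                     else (st2.1 + 1, st2.2.1.insert ps.1 st2.1)
          (st3.1, st3.2, st2.2.2 ++ [(st3.2.getD ps.1 0, ps.2)]))
        (st.1, st.2.1, ([] : List (Int × Int)))
      (r2.1, r2.2.1, st.2.2 ++ [(cd.1, r2.2.2)]))
    ((1 : Int), (PySem.Dict.empty : PySem.Dict String Int), ([] : List (String × List (Int × Int))))
  (r.2.2, r.2.1.items)

-- ===== PORT B =====
-- one first-pass step: assign len(new_hash)+1 to a parent on first occurrence
def pvStepB (nh : PySem.Dict String Int) (p : String) : PySem.Dict String Int :=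
  if nh.contains p then nh else nh.insert p ((nh.size : Int) + 1)

-- pass 1 of B: build the id map over all clients and their data
def pvBuild (clients_and_data : List (String × (List (String × Int)))) : PySem.Dict String Int :=
  clients_and_data.foldl (fun nh cd => cd.2.foldl (fun nh ps => pvStepB nh ps.1) nh) PySem.Dict.empty

def rehash_parent_hash_alt (clients_and_data : List (String × (List (String × Int)))) : (List (String × (List (Int × Int)))) × (List (String × Int)) :=
  let nh := pvBuild clients_and_data
  (clients_and_data.map (fun cd => (cd.1, cd.2.map (fun ps => (nh.getD ps.1 0, ps.2)))), nh.items)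

-- ===== PRECONDITION & SPEC =====
def Spec_rehash_parent_hash (clients_and_data : List (String × (List (String × Int)))) (out : (List (String × (List (Int × Int)))) × (List (String × Int))) : Prop := out = rehash_parent_hash_alt clients_and_data
instance (clients_and_data : List (String × (List (String × Int)))) (out : (List (String × (List (Int × Int)))) × (List (String × Int))) : Decidable (Spec_rehash_parent_hash clients_and_data out) := by unfold Spec_rehash_parent_hash; infer_instance

-- ===== CLAIM (what is proved, stated in full; the proofs are below) =====
def Claim_equal_rehash_parent_hash : Prop := ∀ (clients_and_data : List (String × (List (String × Int)))), Dom_rehash_parent_hash clients_and_data → Spec_rehash_parent_hash clients_and_data (rehash_parent_hash clients_and_data)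

-- ===== LEMMAS AND PROOFS =====

-- d' preserves every binding of d
def pvSub (d d' : PySem.Dict String Int) : Prop :=
  ∀ k v, d.get? k = some v → d'.get? k = some v

theorem pvSub_trans {a b c : PySem.Dict String Int} (h1 : pvSub a b) (h2 : pvSub b c) : pvSub a c :=
  fun k v h => h2 k v (h1 k v h)

theorem pvSub_stepB (nh : PySem.Dict String Int) (p : String) : pvSub nh (pvStepB nh p) := by
  intro k v h
  unfold pvStepB
  split
  · exact h
  · next hc =>
    have hk : k ≠ p := by
      intro he; subst he
      rw [PySem.Dict.contains_eq_isSome_get?, h] at hc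
      simp at hc
    rw [PySem.Dict.get?_insert_of_ne _ _ hk]
    exact h

theorem pvSub_foldl_inner (data : List (String × Int)) (nh : PySem.Dict String Int) :
    pvSub nh (data.foldl (fun nh ps => pvStepB nh ps.1) nh) := by
  induction data generalizing nh with
  | nil => exact fun k v h => h
  | cons ps rest ih =>
    exact pvSub_trans (pvSub_stepB nh ps.1) (ih _)

theorem pvSub_foldl_outer (cad : List (String × (List (String × Int)))) (nh : PySem.Dict String Int) :
    pvSub nh (cad.foldl (fun nh cd => cd.2.foldl (fun nh ps => pvStepB nh ps.1) nh) nh) := by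
  induction cad generalizing nh with
  | nil => exact fun k v h => h
  | cons cd rest ih =>
    exact pvSub_trans (pvSub_foldl_inner cd.2 nh) (ih _)

theorem pvContains_sub {d d' : PySem.Dict String Int} (h : pvSub d d') {k : String}
    (hc : d.contains k = true) : d'.contains k = true := by
  rw [PySem.Dict.contains_eq_isSome_get?] at hc ⊢
  obtain ⟨v, hv⟩ := Option.isSome_iff_exists.mp hc
  rw [h k v hv]; rfl

theorem pvGetD_sub {d d' : PySem.Dict String Int} (h : pvSub d d') {k : String}
    (hc : d.contains k = true) : d'.getD k 0 = d.getD k 0 := by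
  rw [PySem.Dict.contains_eq_isSome_get?] at hc
  obtain ⟨v, hv⟩ := Option.isSome_iff_exists.mp hc
  rw [PySem.Dict.getD_of_get?_eq_some _ _ hv, PySem.Dict.getD_of_get?_eq_some _ _ (h k v hv)]

theorem pvContains_stepB_self (nh : PySem.Dict String Int) (p : String) :
    (pvStepB nh p).contains p = true := by
  unfold pvStepB
  split
  · assumption
  · exact PySem.Dict.contains_insert_self _ _ _

theorem pvContains_foldl_inner_of_mem {data : List (String × Int)} {ps : String × Int}
    (hm : ps ∈ data) (nh : PySem.Dict String Int) :
    (data.foldl (fun nh ps => pvStepB nh ps.1) nh).contains ps.1 = true := by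
  induction data generalizing nh with
  | nil => cases hm
  | cons q rest ih =>
    rcases List.mem_cons.mp hm with rfl | hm
    · exact pvContains_sub (pvSub_foldl_inner rest _) (pvContains_stepB_self nh ps.1)
    · exact ih hm _

-- A's inner-loop step keeps the invariant cnt = size + 1 and builds the same dict as B's step
theorem pvStepA_eq (nh : PySem.Dict String Int) (cnt : Int) (p : String)
    (h : cnt = (nh.size : Int) + 1) :
    (if nh.contains p then (cnt, nh) else (cnt + 1, nh.insert p cnt))
      = (((pvStepB nh p).size : Int) + 1, pvStepB nh p) := by
  unfold pvStepB
  split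
  · rw [h]
  · next hc =>
    have hs : (nh.insert p ((nh.size : Int) + 1)).size = nh.size + 1 := by
      rw [PySem.Dict.size_insert]
      simp [hc]
    rw [h, hs]
    push_cast
    ring_nf

theorem pvInnerA_eq (data : List (String × Int)) (nh : PySem.Dict String Int) (cnt : Int)
    (acc : List (Int × Int)) (h : cnt = (nh.size : Int) + 1) :
    data.foldl
      (fun (st2 : Int × PySem.Dict String Int × List (Int × Int)) ps =>
        let st3 := if st2.2.1.contains ps.1 then (st2.1, st2.2.1)
                   else (st2.1 + 1, st2.2.1.insert ps.1 st2.1)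
        (st3.1, st3.2, st2.2.2 ++ [(st3.2.getD ps.1 0, ps.2)]))
      (cnt, nh, acc)
    = ((((data.foldl (fun nh ps => pvStepB nh ps.1) nh).size : Int) + 1),
        data.foldl (fun nh ps => pvStepB nh ps.1) nh,
        acc ++ data.map (fun ps =>
          ((data.foldl (fun nh ps => pvStepB nh ps.1) nh).getD ps.1 0, ps.2))) := by
  induction data generalizing nh cnt acc with
  | nil => simp [h]
  | cons ps rest ih =>
    have hstep := pvStepA_eq nh cnt ps.1 h
    simp only [List.foldl_cons, List.map_cons]
    rw [hstep]
    rw [ih (pvStepB nh ps.1) _ _ rfl]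
    have hgd : (rest.foldl (fun nh ps => pvStepB nh ps.1) (pvStepB nh ps.1)).getD ps.1 0
        = (pvStepB nh ps.1).getD ps.1 0 :=
      pvGetD_sub (pvSub_foldl_inner rest _) (pvContains_stepB_self nh ps.1)
    rw [hgd]
    simp

theorem pvOuterA_eq (cad : List (String × (List (String × Int)))) (nh : PySem.Dict String Int)
    (cnt : Int) (accOut : List (String × List (Int × Int))) (h : cnt = (nh.size : Int) + 1) :
    cad.foldl
      (fun (st : Int × PySem.Dict String Int × List (String × List (Int × Int))) cd =>
        let r2 := cd.2.foldl
          (fun (st2 : Int × PySem.Dict String Int × List (Int × Int)) ps =>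
            let st3 := if st2.2.1.contains ps.1 then (st2.1, st2.2.1)
                       else (st2.1 + 1, st2.2.1.insert ps.1 st2.1)
            (st3.1, st3.2, st2.2.2 ++ [(st3.2.getD ps.1 0, ps.2)]))
          (st.1, st.2.1, ([] : List (Int × Int)))
        (r2.1, r2.2.1, st.2.2 ++ [(cd.1, r2.2.2)]))
      (cnt, nh, accOut)
    = (let nhF := cad.foldl (fun nh cd => cd.2.foldl (fun nh ps => pvStepB nh ps.1) nh) nh
       ((nhF.size : Int) + 1, nhF,
        accOut ++ cad.map (fun cd => (cd.1, cd.2.map (fun ps => (nhF.getD ps.1 0, ps.2)))))) := by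
  induction cad generalizing nh cnt accOut with
  | nil => simp [h]
  | cons cd rest ih =>
    simp only [List.foldl_cons, List.map_cons]
    rw [pvInnerA_eq cd.2 nh cnt [] h]
    rw [ih (cd.2.foldl (fun nh ps => pvStepB nh ps.1) nh) _ _ rfl]
    have hmap : cd.2.map (fun ps =>
          ((cd.2.foldl (fun nh ps => pvStepB nh ps.1) nh).getD ps.1 0, ps.2))
        = cd.2.map (fun ps =>
          ((rest.foldl (fun nh cd => cd.2.foldl (fun nh ps => pvStepB nh ps.1) nh)
              (cd.2.foldl (fun nh ps => pvStepB nh ps.1) nh)).getD ps.1 0, ps.2)) := by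
      apply List.map_congr_left
      intro ps hps
      have hc := pvContains_foldl_inner_of_mem hps nh
      rw [pvGetD_sub (pvSub_foldl_outer rest _) hc]
    rw [hmap]
    simp

-- ===== VERDICT (by name: the statement is the Claim_ definition above) =====
theorem rehash_parent_hash_spec : Claim_equal_rehash_parent_hash := by
  intro cad _
  unfold Spec_rehash_parent_hash rehash_parent_hash rehash_parent_hash_alt pvBuild
  rw [pvOuterA_eq cad PySem.Dict.empty 1 [] (by simp [PySem.Dict.size_empty])]
  simp
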